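-- pv_equiv track=rewrite | github.com/FINatiend/LJX-also-needs-to-earn-big-money | code-offer/no20isNumeric.py | scanUnsignedInterger
-- ===== SOURCE A (Python) =====
-- def scanUnsignedInterger(str):
--     i = 0
--     numeric = False
--     if len(str) > 0:
--         while len(str) > i and (str[i] >= '0' and str[i] <= '9'):
--             i += 1
--     #表示在.Ee之前有数字
--     if i > 0:
--         numeric = True
--         str = str[i:]
--     return numeric,str
-- ===== SOURCE B (Python) =====
-- def scanUnsignedInterger(str):
--     # Recursive decomposition: peel one leading digit and recurse on the tail.
--     if str and '0' <= str[0] <= '9':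
--         _, rest = scanUnsignedInterger(str[1:])
--         return True, rest
--     return False, str
-- ===== Notes on version B (the rewrite author's own statement) =====
-- stated objective: alternative
-- what changed: Replaces A's iterative index-advancing while-scan followed by a conditional slice with a structural recursion that peels one leading digit at a time, the flag propagating up and the remainder returned from the base case where no digit leads.
import Mathlib
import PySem

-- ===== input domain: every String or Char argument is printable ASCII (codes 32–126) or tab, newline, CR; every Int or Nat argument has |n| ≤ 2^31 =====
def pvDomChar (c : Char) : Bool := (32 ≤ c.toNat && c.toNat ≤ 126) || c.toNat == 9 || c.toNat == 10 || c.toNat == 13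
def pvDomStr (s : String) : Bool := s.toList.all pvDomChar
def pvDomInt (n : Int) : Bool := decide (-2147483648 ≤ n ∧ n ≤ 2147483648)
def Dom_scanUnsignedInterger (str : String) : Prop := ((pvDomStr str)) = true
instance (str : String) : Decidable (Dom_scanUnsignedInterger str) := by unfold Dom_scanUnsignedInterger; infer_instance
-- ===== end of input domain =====

-- B replaces A's index-advancing while-scan plus conditional slice with a structural recursion peeling one leading digit at a time (alternative decomposition, no speed claim); return values proved equal on all strings.


-- ===== PORT A =====
-- the while loop: advance i while str[i] is a digit (structural recursion over the remaining chars)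
def pvScanLoop : List Char → Nat
  | [] => 0
  | c :: cs => if '0' ≤ c && c ≤ '9' then pvScanLoop cs + 1 else 0

def scanUnsignedInterger (str : String) : Bool × String :=
  let i : Nat := if str.toList.length > 0 then pvScanLoop str.toList else 0
  if i > 0 then (true, String.ofList (PySem.List.slice str.toList (some (i : Int)) none))
  else (false, str)

-- ===== PORT B =====
-- Source B's recursion: if the first char is a digit, recurse on the tail and keep its remainder with flag True;
-- otherwise return (False, str) unchanged.
def pvAltRec : List Char → Bool × List Char
  | [] => (false, [])
  | c :: cs => if '0' ≤ c && c ≤ '9' then (true, (pvAltRec cs).2) else (false, c :: cs)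

def scanUnsignedInterger_alt (str : String) : Bool × String :=
  ((pvAltRec str.toList).1, String.ofList (pvAltRec str.toList).2)

-- ===== PRECONDITION & SPEC =====
def Spec_scanUnsignedInterger (str : String) (out : Bool × String) : Prop := out = scanUnsignedInterger_alt str
instance (str : String) (out : Bool × String) : Decidable (Spec_scanUnsignedInterger str out) := by unfold Spec_scanUnsignedInterger; infer_instance

-- ===== CLAIM (what is proved, stated in full; the proofs are below) =====
def Claim_equal_scanUnsignedInterger : Prop := ∀ (str : String), Dom_scanUnsignedInterger str → Spec_scanUnsignedInterger str (scanUnsignedInterger str)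

-- ===== LEMMAS AND PROOFS =====

-- A's while loop counts the longest digit prefix
lemma pv_loop_eq_takeWhile (l : List Char) :
    pvScanLoop l = (l.takeWhile (fun c => '0' ≤ c && c ≤ '9')).length := by
  induction l with
  | nil => rfl
  | cons c cs ih =>
    by_cases h : ('0' ≤ c && c ≤ '9') = true
    · simp [pvScanLoop, List.takeWhile, h, ih]
    · simp [pvScanLoop, List.takeWhile, h]

-- B's recursion returns the digit-prefix flag and the dropWhile remainder
lemma pv_rec_eq (l : List Char) :
    pvAltRec l = (decide (0 < (l.takeWhile (fun c => '0' ≤ c && c ≤ '9')).length),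
                  l.dropWhile (fun c => '0' ≤ c && c ≤ '9')) := by
  induction l with
  | nil => rfl
  | cons c cs ih =>
    by_cases h : ('0' ≤ c && c ≤ '9') = true
    · simp [pvAltRec, List.takeWhile, List.dropWhile, h, ih]
    · simp [pvAltRec, List.takeWhile, List.dropWhile, h]

theorem scanUnsignedInterger_spec : Claim_equal_scanUnsignedInterger := by
  intro s _
  unfold Spec_scanUnsignedInterger scanUnsignedInterger scanUnsignedInterger_alt
  set p : Char → Bool := fun c => '0' ≤ c && c ≤ '9' with hp
  set l := s.toList with hl
  have hsplit : l.takeWhile p ++ l.dropWhile p = l := List.takeWhile_append_dropWhile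
  have hloop : pvScanLoop l = (l.takeWhile p).length := pv_loop_eq_takeWhile l
  have hrec : pvAltRec l = (decide (0 < (l.takeWhile p).length), l.dropWhile p) := pv_rec_eq l
  by_cases hz : l.length > 0
  · simp only [if_pos hz, hloop, hrec]
    by_cases hi : (l.takeWhile p).length > 0
    · simp only [if_pos hi]
      have hdrop : l.drop (l.takeWhile p).length = l.dropWhile p := by
        have h2 := List.drop_left (l₁ := l.takeWhile p) (l₂ := l.dropWhile p)
        rwa [hsplit] at h2
      rw [PySem.List.slice_from_natCast, hdrop]
      simp [hi]
    · simp only [if_neg hi]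
      have h0 : (l.takeWhile p).length = 0 := by omega
      have hdw : l.dropWhile p = l := by
        rw [List.length_eq_zero_iff] at h0
        have h2 := hsplit
        rw [h0] at h2
        simpa using h2
      rw [hdw, hl, String.ofList_toList, h0]
      simp
  · have hnil : l = [] := List.eq_nil_of_length_eq_zero (by omega)
    have h0 : (l.takeWhile p).length = 0 := by rw [hnil]; rfl
    simp only [if_neg hz, hrec, h0]
    have hdw : l.dropWhile p = l := by rw [hnil]; rfl
    rw [hdw, hl, String.ofList_toList]
    simp
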